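-- pv_equiv track=rewrite | github.com/SarthakBaghel/Driver-Drowsiness | drowsiness_detection/camera.py | select_camera_index
-- ===== SOURCE A (Python) =====
-- from typing import Iterable, List
--
-- def _ordered_auto_candidates(available_indices: List[int]) -> List[int]:
--     ordered = sorted(set(available_indices))
--     if len(ordered) >= 2:
--         # On many macOS setups with Continuity/virtual cameras, built-in webcams end up
--         # at higher indexes than iPhone/OBS devices.
--         return list(reversed(ordered))
--     return ordered
--
-- def select_camera_index(
--     requested_index: int,
--     available_indices: List[int],
--     excluded_indices: Iterable[int] = (),
-- ) -> int:
--     if requested_index >= 0: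
--         return requested_index
--
--     if not available_indices:
--         raise RuntimeError(
--             "No camera device detected. Connect a webcam and check camera permissions."
--         )
--
--     excluded = set(excluded_indices)
--     ordered_candidates = _ordered_auto_candidates(available_indices)
--     filtered_indices = [index for index in ordered_candidates if index not in excluded]
--     if filtered_indices:
--         return filtered_indices[0]
--
--     return ordered_candidates[0]
-- ===== SOURCE B (Python) =====
-- from typing import Iterable, List
--
-- def select_camera_index(
--     requested_index: int,
--     available_indices: List[int],
--     excluded_indices: Iterable[int] = (),
-- ) -> int:
--     if requested_index >= 0:
--         return requested_index
--
--     if not available_indices: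
--         raise RuntimeError(
--             "No camera device detected. Connect a webcam and check camera permissions."
--         )
--
--     excluded = set(excluded_indices)
--     overall_max = None
--     best = None
--     for index in available_indices:
--         if overall_max is None or index > overall_max:
--             overall_max = index
--         if index not in excluded and (best is None or index > best):
--             best = index
--     return best if best is not None else overall_max
-- ===== Notes on version B (the rewrite author's own statement) =====
-- stated objective: simpler
-- what changed: Replaced the sorted(set(...))-reverse-filter pipeline and helper with a single linear pass that tracks the running overall maximum and the running maximum of non-excluded indices, with excluded built as a set once.
import Mathlib
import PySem

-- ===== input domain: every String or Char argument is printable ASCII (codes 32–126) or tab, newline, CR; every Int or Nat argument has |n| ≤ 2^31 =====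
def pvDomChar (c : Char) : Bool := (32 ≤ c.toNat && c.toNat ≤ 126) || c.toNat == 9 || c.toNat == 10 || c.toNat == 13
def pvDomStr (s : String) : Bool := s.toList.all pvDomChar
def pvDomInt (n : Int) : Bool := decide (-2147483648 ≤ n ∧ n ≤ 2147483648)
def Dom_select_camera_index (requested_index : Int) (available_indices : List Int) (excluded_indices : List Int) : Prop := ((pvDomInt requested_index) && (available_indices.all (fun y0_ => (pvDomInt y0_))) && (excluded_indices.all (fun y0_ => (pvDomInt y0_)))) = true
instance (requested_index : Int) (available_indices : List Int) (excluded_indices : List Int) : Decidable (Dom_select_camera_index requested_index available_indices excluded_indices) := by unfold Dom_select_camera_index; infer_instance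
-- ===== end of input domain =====

-- B replaces the sort-dedup-reverse-filter pipeline by a single pass tracking two running maxima (objective: simpler).

-- ===== PORT A =====
def ordered_auto_candidates (available_indices : List Int) : List Int :=
  let ordered := PySem.List.sorted (PySem.Set.ofList available_indices) (fun x => x) false
  if 2 ≤ ordered.length then ordered.reverse else ordered

def select_camera_index (requested_index : Int) (available_indices : List Int) (excluded_indices : List Int) : Int :=
  if requested_index ≥ 0 then requested_index
  else
    -- Python raises RuntimeError when available_indices == []; excluded by Pre_
    let excluded := PySem.Set.ofList excluded_indices
    let ordered_candidates := ordered_auto_candidates available_indices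
    let filtered_indices := ordered_candidates.filter (fun i => !(PySem.Set.contains excluded i))
    match filtered_indices with
    | f :: _ => f
    | [] => PySem.List.pyGetD ordered_candidates 0 0   -- ordered_candidates[0]; in range under Pre_

-- ===== PORT B =====
-- 'best if best is not None else overall_max', with the running-max update of Source B's loop
def mstepB (acc : Option Int) (i : Int) : Option Int :=
  match acc with
  | none => some i
  | some m => if i > m then some i else some m

def select_camera_index_alt (requested_index : Int) (available_indices : List Int) (excluded_indices : List Int) : Int :=
  if requested_index ≥ 0 then requested_index
  else
    -- Python raises RuntimeError when available_indices == []; excluded by Pre_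
    let excluded := PySem.Set.ofList excluded_indices
    let st := available_indices.foldl
      (fun (st : Option Int × Option Int) i =>
        (mstepB st.1 i,
         if !(PySem.Set.contains excluded i) then mstepB st.2 i else st.2))
      (none, none)
    match st.2, st.1 with
    | some best, _ => best
    | none, some overall => overall
    | none, none => 0

-- ===== PRECONDITION & SPEC =====
-- Pre_ excludes exactly the inputs where the Python raises RuntimeError (auto mode with no camera): A and B both raise there.
def Pre_select_camera_index (requested_index : Int) (available_indices : List Int) (excluded_indices : List Int) : Prop :=
  0 ≤ requested_index ∨ available_indices ≠ []
instance (requested_index : Int) (available_indices : List Int) (excluded_indices : List Int) : Decidable (Pre_select_camera_index requested_index available_indices excluded_indices) := by unfold Pre_select_camera_index; infer_instance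

def pvWitness_select_camera_index : Int × List Int × List Int := (-1, [0, 1, 2], [2])

def Spec_select_camera_index (requested_index : Int) (available_indices : List Int) (excluded_indices : List Int) (out : Int) : Prop := out = select_camera_index_alt requested_index available_indices excluded_indices
instance (requested_index : Int) (available_indices : List Int) (excluded_indices : List Int) (out : Int) : Decidable (Spec_select_camera_index requested_index available_indices excluded_indices out) := by unfold Spec_select_camera_index; infer_instance

-- ===== CLAIM (what is proved, stated in full; the proofs are below) =====
def Claim_equal_select_camera_index : Prop := ∀ (requested_index : Int) (available_indices : List Int) (excluded_indices : List Int), Dom_select_camera_index requested_index available_indices excluded_indices → Pre_select_camera_index requested_index available_indices excluded_indices → Spec_select_camera_index requested_index available_indices excluded_indices (select_camera_index requested_index available_indices excluded_indices)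

-- ===== LEMMAS AND PROOFS =====

theorem reverse_of_short (L : List Int) (h : ¬ 2 ≤ L.length) : L.reverse = L := by
  match L with
  | [] => rfl
  | [a] => rfl
  | a :: b :: t => exact absurd (by simp) h

theorem mstepB_some (m i : Int) : mstepB (some m) i = some (max m i) := by
  simp only [mstepB]
  by_cases h : i > m
  · rw [if_pos h, max_eq_right (le_of_lt h)]
  · rw [if_neg h, max_eq_left (by omega)]

theorem foldl_mstepB_some : ∀ (xs : List Int) (m : Int),
    xs.foldl mstepB (some m) = some (xs.foldl max m) := by
  intro xs
  induction xs with
  | nil => intro m; rfl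
  | cons a t ih => intro m; simp only [List.foldl_cons, mstepB_some]; exact ih _

theorem foldl_mstepB_none : ∀ (xs : List Int), xs.foldl mstepB none = xs.max? := by
  intro xs
  cases xs with
  | nil => rfl
  | cons a t =>
    simp only [List.foldl_cons]
    show t.foldl mstepB (some a) = _
    rw [foldl_mstepB_some]
    rfl

theorem foldl_pair (p : Int → Bool) :
    ∀ (xs : List Int) (o b : Option Int),
      xs.foldl (fun (st : Option Int × Option Int) i =>
          (mstepB st.1 i, if p i then mstepB st.2 i else st.2)) (o, b)
        = (xs.foldl mstepB o, (xs.filter p).foldl mstepB b) := by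
  intro xs
  induction xs with
  | nil => intro o b; rfl
  | cons a t ih =>
    intro o b
    by_cases h : p a = true <;> simp [List.foldl_cons, h, ih]

theorem foldl_max_of_forall_le : ∀ (t : List Int) (a : Int), (∀ x ∈ t, x ≤ a) → t.foldl max a = a := by
  intro t
  induction t with
  | nil => intro a _; rfl
  | cons x s ih =>
    intro a h
    simp only [List.foldl_cons]
    have hx : x ≤ a := h x (by simp)
    rw [max_eq_left hx]
    exact ih a (fun y hy => h y (by simp [hy]))

theorem head?_eq_max?_of_desc : ∀ (R : List Int), R.Pairwise (fun a b => b ≤ a) → R.head? = R.max? := by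
  intro R h
  cases R with
  | nil => rfl
  | cons a t =>
    have ht : ∀ x ∈ t, x ≤ a := fun x hx => (List.pairwise_cons.mp h).1 x hx
    show some a = (a :: t).max?
    rw [List.max?_cons']
    rw [show t.foldl max a = a from foldl_max_of_forall_le t a ht]

theorem mem_foldl_max : ∀ (t : List Int) (a : Int), t.foldl max a ∈ a :: t := by
  intro t
  induction t with
  | nil => intro a; simp
  | cons x s ih =>
    intro a
    simp only [List.foldl_cons]
    have h := ih (max a x)
    rcases List.mem_cons.mp h with h' | h'
    · rw [h']
      rcases max_choice a x with hm | hm <;> rw [hm] <;> simp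
    · simp [h']

theorem self_le_foldl_max : ∀ (t : List Int) (a : Int), a ≤ t.foldl max a := by
  intro t
  induction t with
  | nil => intro a; simp
  | cons y s ih =>
    intro a
    simp only [List.foldl_cons]
    exact le_trans (le_max_left a y) (ih (max a y))

theorem le_foldl_max : ∀ (t : List Int) (a x : Int), x ∈ a :: t → x ≤ t.foldl max a := by
  intro t
  induction t with
  | nil => intro a x hx; simp only [List.foldl_nil]; simp at hx; omega
  | cons y s ih =>
    intro a x hx
    simp only [List.foldl_cons]
    rcases List.mem_cons.mp hx with h | h
    · subst h
      exact le_trans (le_max_left x y) (self_le_foldl_max s _)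
    · rcases List.mem_cons.mp h with h' | h'
      · subst h'
        exact le_trans (le_max_right a x) (self_le_foldl_max s _)
      · exact ih (max a y) x (List.mem_cons_of_mem _ h')

theorem max?_congr_mem (xs ys : List Int) (h : ∀ a : Int, a ∈ xs ↔ a ∈ ys) : xs.max? = ys.max? := by
  cases xs with
  | nil =>
    cases ys with
    | nil => rfl
    | cons b u => exact absurd ((h b).mpr (by simp)) (by simp)
  | cons a t =>
    cases ys with
    | nil => exact absurd ((h a).mp (by simp)) (by simp)
    | cons b u =>
      rw [List.max?_cons', List.max?_cons']
      congr 1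
      have h1 : t.foldl max a ≤ u.foldl max b :=
        le_foldl_max u b _ ((h _).mp (mem_foldl_max t a))
      have h2 : u.foldl max b ≤ t.foldl max a :=
        le_foldl_max t a _ ((h _).mpr (mem_foldl_max u b))
      omega

-- the descending candidate list of A and its properties
theorem ordered_auto_eq_reverse (av : List Int) :
    ordered_auto_candidates av
      = (PySem.List.sorted (PySem.Set.ofList av) (fun x => x) false).reverse := by
  by_cases h : 2 ≤ (PySem.List.sorted (PySem.Set.ofList av) (fun x => x) false).length
  · simp only [ordered_auto_candidates, if_pos h]
  · simp only [ordered_auto_candidates, if_neg h]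
    exact (reverse_of_short _ h).symm

theorem mem_ordered_auto (av : List Int) (x : Int) :
    x ∈ ordered_auto_candidates av ↔ x ∈ av := by
  rw [ordered_auto_eq_reverse]
  simp [PySem.List.mem_sorted, PySem.Set.mem_ofList]

theorem desc_ordered_auto (av : List Int) :
    (ordered_auto_candidates av).Pairwise (fun a b => b ≤ a) := by
  rw [ordered_auto_eq_reverse]
  rw [List.pairwise_reverse]
  exact (PySem.List.sorted_ofList_pairwise_lt (xs := av)).imp (fun h => le_of_lt h)

-- ===== VERDICT (by name: the statement is the Claim_ definition above) =====
theorem select_camera_index_spec : Claim_equal_select_camera_index := by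
  intro rq av ex _ hpre
  unfold Spec_select_camera_index select_camera_index select_camera_index_alt
  by_cases hrq : rq ≥ 0
  · simp [hrq]
  · simp only [if_neg hrq]
    have hav : av ≠ [] := by
      rcases hpre with h | h
      · omega
      · exact h
    set p : Int → Bool := fun i => !(PySem.Set.contains (PySem.Set.ofList ex) i) with hp
    rw [foldl_pair p av none none]
    rw [foldl_mstepB_none, foldl_mstepB_none]
    set R := ordered_auto_candidates av with hR
    have hmemf : ∀ a : Int, a ∈ R.filter p ↔ a ∈ av.filter p := by
      intro a
      simp [List.mem_filter, hR, mem_ordered_auto]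
    have hdescf : (R.filter p).Pairwise (fun a b => b ≤ a) :=
      (desc_ordered_auto av).filter p
    cases hF : R.filter p with
    | cons f rest =>
      -- A returns f = head of descending filtered list = max of av.filter p
      have h1 : (R.filter p).head? = some f := by rw [hF]; rfl
      have h2 : (av.filter p).max? = some f := by
        rw [← max?_congr_mem _ _ hmemf, ← head?_eq_max?_of_desc _ hdescf, h1]
      rw [h2]
    | nil =>
      -- everything excluded: A returns R[0], B returns overall max
      have hfe : (av.filter p).max? = none := by
        rw [← max?_congr_mem _ _ hmemf, hF]; rfl
      rw [hfe]
      have hRne : R ≠ [] := by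
        intro hnil
        cases av with
        | nil => exact hav rfl
        | cons a t =>
          have : a ∈ R := (mem_ordered_auto (a :: t) a).mpr (by simp)
          rw [hnil] at this; simp at this
      have hmax : R.head? = av.max? := by
        rw [head?_eq_max?_of_desc _ (desc_ordered_auto av)]
        exact max?_congr_mem _ _ (mem_ordered_auto av)
      cases hh : R with
      | nil => exact absurd hh hRne
      | cons r0 rt =>
        have : av.max? = some r0 := by rw [← hmax, hh]; rfl
        rw [this]
        simp [PySem.List.pyGetD_zero_cons]
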